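-- pv_equiv track=rewrite | github.com/abhishek4life/Love_Python2.O | Love_Python/IITMBS/OPPE1/P4 SEP 24.py | find_longest_antakshari
-- ===== SOURCE A (Python) =====
-- def find_longest_antakshari(words):
--     max_len = 1
--     prev_word = words[0]
--     anthakshari_len = 1
--     for word in words[1:]:
--         if prev_word[-1] == word[0]:
--             anthakshari_len +=1
--         else:
--             anthakshari_len = 1
--         if anthakshari_len > max_len:
--             max_len = anthakshari_len
--         prev_word = word
--     return max_len
-- ===== SOURCE B (Python) =====
-- def find_longest_antakshari(words):
--     n = len(words)
--     breaks = [i for i in range(1, n) if words[i - 1][-1] != words[i][0]]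
--     boundaries = [0] + breaks + [n]
--     return max(b - a for a, b in zip(boundaries, boundaries[1:]))
-- ===== Notes on version B (the rewrite author's own statement) =====
-- stated objective: alternative
-- what changed: B partitions the sequence up front into maximal chained segments by computing the list of break indices and boundary gaps, then takes the max gap, instead of A's incremental running-counter scan.
import Mathlib
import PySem

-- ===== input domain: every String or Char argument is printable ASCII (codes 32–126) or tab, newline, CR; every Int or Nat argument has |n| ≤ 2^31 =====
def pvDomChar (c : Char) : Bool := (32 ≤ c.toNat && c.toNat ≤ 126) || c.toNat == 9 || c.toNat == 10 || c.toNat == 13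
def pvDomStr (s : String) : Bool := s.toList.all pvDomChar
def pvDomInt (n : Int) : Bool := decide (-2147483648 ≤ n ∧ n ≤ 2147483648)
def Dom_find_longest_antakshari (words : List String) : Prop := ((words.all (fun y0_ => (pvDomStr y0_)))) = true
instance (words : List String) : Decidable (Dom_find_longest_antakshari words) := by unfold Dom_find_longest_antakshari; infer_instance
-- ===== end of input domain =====

-- B partitions the word list into maximal chained segments via break indices and takes the
-- largest boundary gap, instead of A's incremental running-counter scan (objective: alternative).

-- ===== PORT A =====
-- loop body of A: state = (max_len, anthakshari_len, prev_word)
def pvStepA (st : Int × Int × String) (word : String) : Int × Int × String :=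
  let l := if PySem.Str.pyGet? st.2.2 (-1) == PySem.Str.pyGet? word 0 then st.2.1 + 1 else (1 : Int)
  let m := if l > st.1 then l else st.1
  (m, l, word)

def find_longest_antakshari (words : List String) : Int :=
  match words with
  | [] => 0  -- Python raises IndexError on words[0]; excluded by Pre_
  | w0 :: _ => ((words.drop 1).foldl pvStepA (1, 1, w0)).1  -- words[1:] = words.drop 1

-- ===== PORT B =====
def find_longest_antakshari_alt (words : List String) : Int :=
  let n : Int := words.length
  let breaks := (PySem.List.pyRange 1 n 1).filter (fun i =>
    !(((PySem.List.pyGet? words (i - 1)).bind fun w => PySem.Str.pyGet? w (-1)) ==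
      ((PySem.List.pyGet? words i).bind fun w => PySem.Str.pyGet? w 0)))
  let boundaries : List Int := 0 :: (breaks ++ [n])
  -- max(b - a for a, b in zip(boundaries, boundaries[1:])); the list is never empty, so
  -- Python's max never raises and the .getD 0 default is unreachable
  (PySem.List.max? (((boundaries.zip (boundaries.drop 1)).map fun p => p.2 - p.1) ) (fun y => y)).getD 0

-- ===== PRECONDITION & SPEC =====
-- Pre_ excludes exactly the inputs where Python A raises IndexError: the empty list
-- (words[0]), and lists of two or more words containing an empty word (''[-1] / ''[0]).
def Pre_find_longest_antakshari (words : List String) : Prop :=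
  words ≠ [] ∧ (1 < words.length → ∀ w ∈ words, w.toList ≠ [])

instance (words : List String) : Decidable (Pre_find_longest_antakshari words) := by
  unfold Pre_find_longest_antakshari; infer_instance

def pvWitness_find_longest_antakshari : List String := ["ab", "ba", "cd"]

def Spec_find_longest_antakshari (words : List String) (out : Int) : Prop := out = find_longest_antakshari_alt words
instance (words : List String) (out : Int) : Decidable (Spec_find_longest_antakshari words out) := by unfold Spec_find_longest_antakshari; infer_instance

-- ===== CLAIM (what is proved, stated in full; the proofs are below) =====
def Claim_equal_find_longest_antakshari : Prop := ∀ (words : List String), Dom_find_longest_antakshari words → Pre_find_longest_antakshari words → Spec_find_longest_antakshari words (find_longest_antakshari words)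


-- ===== LEMMAS AND PROOFS =====

-- the chain predicate prev_word[-1] == word[0] (as Option Char equality, as both ports use it)
def pvChain (a b : String) : Bool := PySem.Str.pyGet? a (-1) == PySem.Str.pyGet? b 0

-- flags of adjacent pairs
def pvFlags : List String → List Bool
  | a :: b :: r => pvChain a b :: pvFlags (b :: r)
  | _ => []

-- A's loop body expressed over the flag sequence
def pvStepF (p : Int × Int) (f : Bool) : Int × Int :=
  let l := if f then p.2 + 1 else 1
  (if l > p.1 then l else p.1, l)

-- length of the longest run, recursively
def pvMrun (cur : Int) : List Bool → Int
  | [] => cur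
  | f :: fs => if f then pvMrun (cur + 1) fs else max cur (pvMrun 1 fs)

-- the list of maximal segment lengths
def pvRunsAux (cur : Int) : List Bool → List Int
  | [] => [cur]
  | f :: fs => if f then pvRunsAux (cur + 1) fs else cur :: pvRunsAux 1 fs

-- the break positions (boundary values), starting after absolute flag offset q
def pvBreaksOf (q : Int) : List Bool → List Int
  | [] => []
  | f :: fs => if f then pvBreaksOf (q + 1) fs else (q + 1) :: pvBreaksOf (q + 1) fs

-- consecutive differences starting from a
def pvGaps (a : Int) : List Int → List Int
  | [] => []
  | b :: bs => (b - a) :: pvGaps b bs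

theorem pvFlags_length (ws : List String) : (pvFlags ws).length = ws.length - 1 := by
  induction ws with
  | nil => simp [pvFlags]
  | cons a r ih =>
    cases r with
    | nil => simp [pvFlags]
    | cons b t => simp [pvFlags] at ih ⊢; omega

theorem pvFlags_getElem? (ws : List String) (k : Nat) (h : k + 1 < ws.length) :
    (pvFlags ws)[k]? = some (pvChain ws[k]! ws[k+1]!) := by
  induction ws generalizing k with
  | nil => simp at h
  | cons a r ih =>
    cases r with
    | nil => simp at h
    | cons b t =>
      cases k with
      | zero => simp [pvFlags]
      | succ k =>
        simp only [pvFlags, List.getElem?_cons_succ]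
        rw [ih k (by simpa using h)]
        simp

-- ---- A side ----

theorem pvStepA_fold (ws : List String) : ∀ (prev : String) (m l : Int),
    (ws.foldl pvStepA (m, l, prev)).1 = ((pvFlags (prev :: ws)).foldl pvStepF (m, l)).1 := by
  induction ws with
  | nil => intro prev m l; simp [pvFlags]
  | cons w t ih =>
    intro prev m l
    simp only [List.foldl_cons, pvFlags]
    rw [show pvStepA (m, l, prev) w =
        ((pvStepF (m, l) (pvChain prev w)).1, (pvStepF (m, l) (pvChain prev w)).2, w) from rfl]
    exact ih w _ _

theorem pvMrun_le (fs : List Bool) : ∀ cur : Int, cur ≤ pvMrun cur fs := by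
  induction fs with
  | nil => intro cur; simp [pvMrun]
  | cons f t ih =>
    intro cur
    by_cases hf : f
    · simp only [pvMrun, hf, if_true]
      have := ih (cur + 1); omega
    · simp only [pvMrun, hf, if_false]
      exact le_max_left _ _

theorem pvStepF_fold (fs : List Bool) : ∀ (m l : Int), 1 ≤ l → l ≤ m →
    (fs.foldl pvStepF (m, l)).1 = max m (pvMrun l fs) := by
  induction fs with
  | nil => intro m l _ hlm; simp [pvMrun]; omega
  | cons f t ih =>
    intro m l hl hlm
    by_cases hf : f
    · simp only [List.foldl_cons, pvStepF, pvMrun, hf, if_true]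
      have h1 : (if l + 1 > m then l + 1 else m) = max m (l + 1) := by
        rcases le_or_gt (l + 1) m with h | h <;> simp [max_def] <;> omega
      rw [h1, ih (max m (l + 1)) (l + 1) (by omega) (le_max_right _ _)]
      have h2 := pvMrun_le t (l + 1)
      rcases le_or_gt (l + 1) m with h | h <;>
        simp [max_def] <;> omega
    · simp only [List.foldl_cons, pvStepF, pvMrun, hf, Bool.false_eq_true, if_false]
      have h1 : (if (1 : Int) > m then (1 : Int) else m) = m := by omega
      rw [h1, ih m 1 le_rfl (by omega)]
      rcases le_or_gt (pvMrun 1 t) m with h | h <;> simp [max_def] <;> omega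

-- ---- B side ----

theorem pvGaps_breaks (fs : List Bool) : ∀ (b q : Int),
    pvGaps b (pvBreaksOf q fs ++ [q + fs.length + 1]) = pvRunsAux (q + 1 - b) fs := by
  induction fs with
  | nil => intro b q; simp [pvBreaksOf, pvGaps, pvRunsAux]
  | cons f t ih =>
    intro b q
    by_cases hf : f
    · simp only [pvBreaksOf, pvRunsAux, hf, if_true]
      have harith : q + (t.length + 1 : Nat) + 1 = (q + 1) + (t.length : Int) + 1 := by
        push_cast; ring
      rw [List.length_cons, harith, ih b (q + 1)]
      congr 1; ring
    · simp only [pvBreaksOf, pvRunsAux, hf, Bool.false_eq_true, if_false, List.cons_append, pvGaps]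
      have harith : q + (t.length + 1 : Nat) + 1 = (q + 1) + (t.length : Int) + 1 := by
        push_cast; ring
      rw [List.length_cons, harith, ih (q + 1) (q + 1)]
      norm_num

theorem pvZip_gaps (bs : List Int) : ∀ a : Int,
    (((a :: bs).zip bs).map fun p => p.2 - p.1) = pvGaps a bs := by
  induction bs with
  | nil => intro a; simp [pvGaps]
  | cons b t ih => intro a; simp only [List.zip_cons_cons, List.map_cons, pvGaps]; rw [ih b]

theorem pvFoldl_max_runs (fs : List Bool) : ∀ (a cur : Int),
    (pvRunsAux cur fs).foldl max a = max a (pvMrun cur fs) := by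
  induction fs with
  | nil => intro a cur; simp [pvRunsAux, pvMrun]
  | cons f t ih =>
    intro a cur
    by_cases hf : f
    · simp only [pvRunsAux, pvMrun, hf, if_true]; exact ih a (cur + 1)
    · simp only [pvRunsAux, pvMrun, hf, Bool.false_eq_true, if_false, List.foldl_cons]
      rw [ih (max a cur) 1, max_assoc]

theorem pvMax?_runs (fs : List Bool) : ∀ cur : Int,
    PySem.List.max? (pvRunsAux cur fs) (fun y => y) = some (pvMrun cur fs) := by
  induction fs with
  | nil => intro cur; simp [pvRunsAux, pvMrun, PySem.List.max?_id_cons]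
  | cons f t ih =>
    intro cur
    by_cases hf : f
    · simp only [pvRunsAux, pvMrun, hf, if_true]; exact ih (cur + 1)
    · simp only [pvRunsAux, pvMrun, hf, Bool.false_eq_true, if_false]
      rw [PySem.List.max?_id_cons, pvFoldl_max_runs]

theorem pvBreaksOf_shift (fs : List Bool) : ∀ q : Int,
    pvBreaksOf q fs = ((List.range fs.length).filter (fun k => !(fs[k]!))).map
      (fun k : Nat => q + 1 + (k : Int)) := by
  induction fs with
  | nil => intro q; simp [pvBreaksOf]
  | cons f t ih =>
    intro q
    have hmap : ((List.range t.length).map Nat.succ).filter (fun k => !((f :: t)[k]!)) =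
        ((List.range t.length).filter ((fun k => !((f :: t)[k]!)) ∘ Nat.succ)).map Nat.succ :=
      List.filter_map
    have hcomp : ((List.range t.length).filter ((fun k => !((f :: t)[k]!)) ∘ Nat.succ)) =
        ((List.range t.length).filter (fun k => !(t[k]!))) := by
      apply List.filter_congr; intro k _; simp [Function.comp]
    have htail : (((List.range t.length).filter (fun k => !(t[k]!))).map Nat.succ).map
          (fun k : Nat => q + 1 + (k : Int))
        = ((List.range t.length).filter (fun k => !(t[k]!))).map
          (fun k : Nat => (q + 1) + 1 + (k : Int)) := by
      rw [List.map_map]; apply List.map_congr_left; intro k _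
      simp only [Function.comp, Nat.succ_eq_add_one]; push_cast; ring
    rw [List.length_cons, List.range_succ_eq_map, List.filter_cons, hmap, hcomp]
    cases f with
    | true =>
      simp only [pvBreaksOf, if_true, List.getElem!_cons_zero, Bool.not_true,
        Bool.false_eq_true, if_false]
      rw [htail, ih (q + 1)]
    | false =>
      simp only [pvBreaksOf, Bool.false_eq_true, if_false, List.getElem!_cons_zero,
        Bool.not_false, if_true, List.map_cons]
      rw [htail, ih (q + 1)]
      norm_num

-- the port-B break list is exactly pvBreaksOf 0 of the flag sequence
theorem pvBreaks_eq (ws : List String) :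
    ((PySem.List.pyRange 1 (ws.length : Int) 1).filter (fun i =>
      !(((PySem.List.pyGet? ws (i - 1)).bind fun w => PySem.Str.pyGet? w (-1)) ==
        ((PySem.List.pyGet? ws i).bind fun w => PySem.Str.pyGet? w 0)))) =
    pvBreaksOf 0 (pvFlags ws) := by
  rw [PySem.List.pyRange_one, List.filter_map]
  rw [pvBreaksOf_shift]
  have hlen : ((ws.length : Int) - 1).toNat = (pvFlags ws).length := by
    rw [pvFlags_length]; omega
  rw [hlen]
  have hcong : (List.range (pvFlags ws).length).filter
        ((fun i => !(((PySem.List.pyGet? ws (i - 1)).bind fun w => PySem.Str.pyGet? w (-1)) ==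
          ((PySem.List.pyGet? ws i).bind fun w => PySem.Str.pyGet? w 0))) ∘ (fun k : Nat => 1 + (k : Int)))
      = (List.range (pvFlags ws).length).filter (fun k => !((pvFlags ws)[k]!)) := by
    apply List.filter_congr
    intro k hk
    simp only [List.mem_range] at hk
    have hk' : k + 1 < ws.length := by have := pvFlags_length ws; omega
    have h2 : (1 : Int) + (k : Int) = ((k + 1 : Nat) : Int) := by push_cast; ring
    have h1 : ((k + 1 : Nat) : Int) - 1 = ((k : Nat) : Int) := by push_cast; ring
    simp only [Function.comp]
    rw [h2, h1]
    simp only [PySem.List.pyGet?_natCast]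
    have hg1 : ws[k]? = some ws[k]! := by
      rw [List.getElem!_eq_getElem?_getD]
      cases hx : ws[k]? with
      | none => exact absurd (List.getElem?_eq_none_iff.mp hx) (by omega)
      | some v => simp
    have hg2 : ws[k+1]? = some ws[k+1]! := by
      rw [List.getElem!_eq_getElem?_getD]
      cases hx : ws[k+1]? with
      | none => exact absurd (List.getElem?_eq_none_iff.mp hx) (by omega)
      | some v => simp
    have hfl : (pvFlags ws)[k]! = pvChain ws[k]! ws[k+1]! := by
      rw [List.getElem!_eq_getElem?_getD, pvFlags_getElem? ws k hk']; simp
    rw [hg1, hg2, hfl]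
    simp [pvChain]
  rw [hcong]
  apply List.map_congr_left
  intro k _
  norm_num

-- A on a nonempty list computes pvMrun 1 of the flags
theorem pvA_eq (w0 : String) (rest : List String) :
    find_longest_antakshari (w0 :: rest) = pvMrun 1 (pvFlags (w0 :: rest)) := by
  show ((rest.foldl pvStepA (1, 1, w0)).1 : Int) = _
  rw [pvStepA_fold rest w0 1 1, pvStepF_fold (pvFlags (w0 :: rest)) 1 1 le_rfl le_rfl]
  exact max_eq_right (pvMrun_le (pvFlags (w0 :: rest)) 1)

-- B on a nonempty list computes pvMrun 1 of the flags
theorem pvB_eq (w0 : String) (rest : List String) :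
    find_longest_antakshari_alt (w0 :: rest) = pvMrun 1 (pvFlags (w0 :: rest)) := by
  unfold find_longest_antakshari_alt
  simp only [pvBreaks_eq]
  set fs := pvFlags (w0 :: rest) with hfs
  have hn : ((w0 :: rest).length : Int) = 0 + (fs.length : Int) + 1 := by
    rw [hfs, pvFlags_length]; simp only [List.length_cons]; omega
  rw [hn]
  rw [List.drop_one, List.tail_cons, pvZip_gaps, pvGaps_breaks fs 0 0]
  norm_num [pvMax?_runs fs 1]

-- ===== VERDICT (by name: the statement is the Claim_ definition above) =====
theorem find_longest_antakshari_spec : Claim_equal_find_longest_antakshari := by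
  intro words _ hpre
  unfold Spec_find_longest_antakshari
  cases words with
  | nil => exact absurd rfl hpre.1
  | cons w0 rest => rw [pvA_eq, pvB_eq]
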